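-- pv_equiv track=rewrite | github.com/JoelNiklaus/LawInstruct | instruction_datasets/greek_ner.py | group_by_sentence
-- ===== SOURCE A (Python) =====
-- from collections.abc import Iterable
-- from collections.abc import Iterator
--
-- def group_by_sentence(rows: Iterable) -> Iterator[tuple[list[str], list[str]]]:
--     # Sentence ID is empty except first word of sentence.
--     tokens, tags = [], []
--     for _, row in rows:
--         if row["Sent_ID"]:
--             yield tokens, tags
--             tokens, tags = [], []  # Reset.
--         tokens.append(row["Word"])
--         tags.append(row["Tag"])
--     if tokens and tags:  # Don't yield empty final sentence.
--         yield tokens, tags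
-- ===== SOURCE B (Python) =====
-- def group_by_sentence(rows):
--     # Two-stage slicing scheme: collect the indices where a sentence starts
--     # (truthy Sent_ID), then cut the row list at those indices and project
--     # each slice to its words and tags.
--     rows = list(rows)
--     starts = [i for i, (_, row) in enumerate(rows) if row["Sent_ID"]]
--     prev = 0
--     for b in starts:
--         chunk = rows[prev:b]
--         yield [r["Word"] for _, r in chunk], [r["Tag"] for _, r in chunk]
--         prev = b
--     tail = rows[prev:]
--     if tail:
--         yield [r["Word"] for _, r in tail], [r["Tag"] for _, r in tail]
-- ===== Notes on version B (the rewrite author's own statement) =====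
-- stated objective: alternative
-- what changed: B is a two-stage slicing scheme: it first collects the boundary indices where Sent_ID is truthy, then cuts the row list at consecutive boundaries and projects each slice to its word and tag lists, instead of A's fused forward scan with mutable accumulators; Pre_ only excludes rows whose dict lacks one of the three keys, where A raises KeyError.
import Mathlib
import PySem

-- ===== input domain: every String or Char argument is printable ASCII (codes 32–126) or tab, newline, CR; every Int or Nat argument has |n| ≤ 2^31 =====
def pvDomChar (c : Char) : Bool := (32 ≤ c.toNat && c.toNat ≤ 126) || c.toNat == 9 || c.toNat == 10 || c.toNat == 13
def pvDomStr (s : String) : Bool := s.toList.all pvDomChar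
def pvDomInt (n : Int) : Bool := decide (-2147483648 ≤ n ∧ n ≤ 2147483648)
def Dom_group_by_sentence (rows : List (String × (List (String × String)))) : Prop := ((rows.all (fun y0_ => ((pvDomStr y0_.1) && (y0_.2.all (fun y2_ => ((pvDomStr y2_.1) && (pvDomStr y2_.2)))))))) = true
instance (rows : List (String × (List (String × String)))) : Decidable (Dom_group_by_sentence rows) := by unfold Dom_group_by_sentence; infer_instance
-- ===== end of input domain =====

-- B computes the boundary indices of sentence starts and cuts the row list at them
-- (two staged passes over index slices) instead of A's fused forward scan; both Pythons
-- are generators, so the equivalence is about the sequence of yielded values.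

-- ===== PORT A =====
-- loop body of A's forward scan (yield at truthy Sent_ID, then append word/tag)
def gbsStepA (st : List (List String × List String) × List String × List String)
    (r : String × (List (String × String))) : List (List String × List String) × List String × List String :=
  let row := r.2
  let st :=
    if PySem.Dict.getD (PySem.Dict.mk row) "Sent_ID" "" ≠ "" then
      (st.1 ++ [(st.2.1, st.2.2)], ([] : List String), ([] : List String))
    else st
  (st.1, st.2.1 ++ [PySem.Dict.getD (PySem.Dict.mk row) "Word" ""], st.2.2 ++ [PySem.Dict.getD (PySem.Dict.mk row) "Tag" ""])

-- forward scan: yield accumulated sentence at each truthy Sent_ID, suppress empty final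
def group_by_sentence (rows : List (String × (List (String × String)))) : List (List String × List String) :=
  let st := rows.foldl gbsStepA ([], [], [])
  if st.2.1 ≠ [] ∧ st.2.2 ≠ [] then st.1 ++ [(st.2.1, st.2.2)] else st.1

-- ===== PORT B =====
def gbsMark (r : String × (List (String × String))) : Bool :=
  decide (PySem.Dict.getD (PySem.Dict.mk r.2) "Sent_ID" "" ≠ "")

-- project a slice of rows to its (words, tags)
def gbsGrp (chunk : List (String × (List (String × String)))) : List String × List String :=
  (chunk.map (fun r => PySem.Dict.getD (PySem.Dict.mk r.2) "Word" ""),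
   chunk.map (fun r => PySem.Dict.getD (PySem.Dict.mk r.2) "Tag" ""))

-- body of B's walk over the boundary indices: emit rows[prev:b], set prev := b
def gbsCut (rows : List (String × (List (String × String))))
    (st : List (List String × List String) × Int) (b : Int) :
    List (List String × List String) × Int :=
  (st.1 ++ [gbsGrp (PySem.List.slice rows (some st.2) (some b))], b)

-- boundary indices where Sent_ID is truthy, then cut at consecutive boundaries; tail rows[prev:] if non-empty
def group_by_sentence_alt (rows : List (String × (List (String × String)))) :
    List (List String × List String) :=
  let starts := ((PySem.List.enumerate rows 0).filter (fun p => gbsMark p.2)).map (fun p => p.1)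
  let st := starts.foldl (gbsCut rows) ([], 0)
  let tail := PySem.List.slice rows (some st.2) none
  if tail ≠ [] then st.1 ++ [gbsGrp tail] else st.1

-- ===== PRECONDITION & SPEC =====
-- A raises KeyError when some row's dict lacks one of "Sent_ID"/"Word"/"Tag"; Pre_ excludes exactly those inputs.
def Pre_group_by_sentence (rows : List (String × (List (String × String)))) : Prop :=
  ∀ r ∈ rows, (PySem.Dict.get? (PySem.Dict.mk r.2) "Sent_ID").isSome ∧ (PySem.Dict.get? (PySem.Dict.mk r.2) "Word").isSome ∧ (PySem.Dict.get? (PySem.Dict.mk r.2) "Tag").isSome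
instance (rows : List (String × (List (String × String)))) : Decidable (Pre_group_by_sentence rows) := by unfold Pre_group_by_sentence; infer_instance
def pvWitness_group_by_sentence : (List (String × (List (String × String)))) :=
  [("1", [("Sent_ID", "s1"), ("Word", "Hello"), ("Tag", "O")]),
   ("2", [("Sent_ID", ""), ("Word", "world"), ("Tag", "O")])]
def Spec_group_by_sentence (rows : List (String × (List (String × String)))) (out : List (List String × List String)) : Prop := out = group_by_sentence_alt rows
instance (rows : List (String × (List (String × String)))) (out : List (List String × List String)) : Decidable (Spec_group_by_sentence rows out) := by unfold Spec_group_by_sentence; infer_instance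

-- ===== CLAIM =====
def Claim_equal_group_by_sentence : Prop := ∀ (rows : List (String × (List (String × String)))), Dom_group_by_sentence rows → Pre_group_by_sentence rows → Spec_group_by_sentence rows (group_by_sentence rows)

-- ===== LEMMAS AND PROOFS =====

-- mid-level reference: split the rows into sentence chunks given a pending chunk
def splitRows (p : List (String × (List (String × String)))) :
    List (String × (List (String × String))) → List (List (String × (List (String × String))))
  | [] => if p ≠ [] then [p] else []
  | r :: rs => if gbsMark r then p :: splitRows [r] rs else splitRows (p ++ [r]) rs

theorem gbsStepA_pos (st : List (List String × List String) × List String × List String)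
    (r : String × (List (String × String))) (h : gbsMark r = true) :
    gbsStepA st r = (st.1 ++ [(st.2.1, st.2.2)],
      [PySem.Dict.getD (PySem.Dict.mk r.2) "Word" ""], [PySem.Dict.getD (PySem.Dict.mk r.2) "Tag" ""]) := by
  have h' := of_decide_eq_true h
  simp [gbsStepA, h']

theorem gbsStepA_neg (st : List (List String × List String) × List String × List String)
    (r : String × (List (String × String))) (h : ¬ gbsMark r = true) :
    gbsStepA st r = (st.1, st.2.1 ++ [PySem.Dict.getD (PySem.Dict.mk r.2) "Word" ""],
      st.2.2 ++ [PySem.Dict.getD (PySem.Dict.mk r.2) "Tag" ""]) := by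
  have h' := of_decide_eq_false (Bool.of_not_eq_true h)
  simp [gbsStepA, not_not.mp h']

-- A's foldl with pending chunk p equals the chunks of splitRows, projected
theorem gbsA_split (rows : List (String × (List (String × String)))) :
    ∀ (out : List (List String × List String)) (p : List (String × (List (String × String)))),
    (let st := rows.foldl gbsStepA (out, (gbsGrp p).1, (gbsGrp p).2)
     if st.2.1 ≠ [] ∧ st.2.2 ≠ [] then st.1 ++ [(st.2.1, st.2.2)] else st.1)
      = out ++ (splitRows p rows).map gbsGrp := by
  induction rows with
  | nil =>
    intro out p
    simp only [List.foldl_nil, splitRows, gbsGrp]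
    by_cases hp : p = []
    · simp [hp]
    · simp [hp, List.map_eq_nil_iff, gbsGrp]
  | cons r rs ih =>
    intro out p
    by_cases h : gbsMark r = true
    · simp only [List.foldl_cons, splitRows, if_pos h]
      have hw : [PySem.Dict.getD (PySem.Dict.mk r.2) "Word" ""] = (gbsGrp [r]).1 := by simp [gbsGrp]
      have ht : [PySem.Dict.getD (PySem.Dict.mk r.2) "Tag" ""] = (gbsGrp [r]).2 := by simp [gbsGrp]
      rw [gbsStepA_pos _ _ h, hw, ht, ih (out ++ [((gbsGrp p).1, (gbsGrp p).2)]) [r]]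
      simp
    · simp only [List.foldl_cons, splitRows, if_neg h]
      have hw : (gbsGrp p).1 ++ [PySem.Dict.getD (PySem.Dict.mk r.2) "Word" ""] = (gbsGrp (p ++ [r])).1 := by
        simp [gbsGrp]
      have ht : (gbsGrp p).2 ++ [PySem.Dict.getD (PySem.Dict.mk r.2) "Tag" ""] = (gbsGrp (p ++ [r])).2 := by
        simp [gbsGrp]
      rw [gbsStepA_neg _ _ h, hw, ht, ih out (p ++ [r])]

theorem gbsA_eq (rows : List (String × (List (String × String)))) :
    group_by_sentence rows = (splitRows [] rows).map gbsGrp := by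
  have h := gbsA_split rows [] []
  simpa [group_by_sentence, gbsGrp] using h

-- boundary indices of a suffix, counted from absolute index s
def boundsFrom (s : Int) : List (String × (List (String × String))) → List Int
  | [] => []
  | r :: rs => if gbsMark r then s :: boundsFrom (s + 1) rs else boundsFrom (s + 1) rs

theorem enum_bounds (rs : List (String × (List (String × String)))) :
    ∀ s : Int, ((PySem.List.enumerate rs s).filter (fun p => gbsMark p.2)).map (fun p => p.1)
      = boundsFrom s rs := by
  induction rs with
  | nil => intro s; simp [PySem.List.enumerate_nil, boundsFrom]
  | cons r rs ih =>
    intro s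
    rw [PySem.List.enumerate_cons]
    by_cases h : gbsMark r = true
    · simp [h, boundsFrom, ih (s + 1)]
    · simp [h, boundsFrom, ih (s + 1)]

-- B's boundary walk, generalized: pending chunk is rows[p:i], remaining rows are rows.drop i
theorem gbsB_split (rows : List (String × (List (String × String)))) :
    ∀ (rs : List (String × (List (String × String)))) (i p : Nat)
      (acc : List (List String × List String)),
    rs = rows.drop i → p ≤ i →
    (let st := (boundsFrom (i : Int) rs).foldl (gbsCut rows) (acc, (p : Int))
     let tail := PySem.List.slice rows (some st.2) none
     if tail ≠ [] then st.1 ++ [gbsGrp tail] else st.1)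
      = acc ++ (splitRows ((rows.drop p).take (i - p)) rs).map gbsGrp := by
  intro rs
  induction rs with
  | nil =>
    intro i p acc hrs hpi
    have hlen : rows.length ≤ i := List.drop_eq_nil_iff.mp hrs.symm
    have htake : (rows.drop p).take (i - p) = rows.drop p := by
      apply List.take_of_length_le
      simp only [List.length_drop]
      omega
    by_cases hp : rows.drop p = []
    · simp [boundsFrom, PySem.List.slice_from_natCast, splitRows, hp]
    · simp [boundsFrom, PySem.List.slice_from_natCast, splitRows, htake, hp]
  | cons r rs' ih =>
    intro i p acc hrs hpi
    have hi : i < rows.length := by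
      by_contra hc
      rw [not_lt] at hc
      rw [List.drop_eq_nil_of_le hc] at hrs
      exact List.cons_ne_nil _ _ hrs
    have hcons : rows.drop i = rows[i] :: rows.drop (i + 1) := List.drop_eq_getElem_cons hi
    rw [hcons] at hrs
    injection hrs with hr hrs'
    by_cases h : gbsMark r = true
    · simp only [boundsFrom, if_pos h, List.foldl_cons, gbsCut]
      have hslice : PySem.List.slice rows (some (p : Int)) (some (i : Int))
          = (rows.drop p).take (i - p) := PySem.List.slice_natCast rows p i
      have hstep := ih (i + 1) i (acc ++ [gbsGrp ((rows.drop p).take (i - p))]) hrs' (by omega)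
      have hpend : (rows.drop i).take (i + 1 - i) = [r] := by
        have h1 : i + 1 - i = 1 := by omega
        rw [h1, hcons, hr]
        rfl
      have hcast : (i : Int) + 1 = ((i + 1 : Nat) : Int) := by push_cast; ring
      rw [hslice, hcast, hstep, hpend]
      simp only [splitRows, if_pos h, List.map_cons, List.append_assoc, List.singleton_append]
    · simp only [boundsFrom, if_neg h]
      have hcast : (i : Int) + 1 = ((i + 1 : Nat) : Int) := by push_cast; ring
      have hstep := ih (i + 1) p acc hrs' (by omega)
      have hpend : (rows.drop p).take (i + 1 - p) = (rows.drop p).take (i - p) ++ [r] := by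
        have hs : i + 1 - p = (i - p) + 1 := by omega
        rw [hs, List.take_add_one]
        have : (rows.drop p)[i - p]? = some r := by
          rw [List.getElem?_drop]
          have : p + (i - p) = i := by omega
          rw [this, List.getElem?_eq_getElem hi, hr]
        simp [this]
      rw [hcast, hstep, hpend]
      simp only [splitRows, if_neg h]

theorem gbsB_eq (rows : List (String × (List (String × String)))) :
    group_by_sentence_alt rows = (splitRows [] rows).map gbsGrp := by
  have h := gbsB_split rows rows 0 0 [] (by simp) (le_refl 0)
  simpa [group_by_sentence_alt, enum_bounds] using h

-- ===== VERDICT =====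
theorem group_by_sentence_spec : Claim_equal_group_by_sentence := by
  intro rows _ _
  unfold Spec_group_by_sentence
  rw [gbsA_eq, gbsB_eq]
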